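-- pv_equiv track=rewrite | github.com/alxleo/docker-images | pr-reviewer/scripts/review_core.py | preprocess_diff
-- ===== SOURCE A (Python) =====
-- _EXT_TO_LANG = {
--     ".py": "Python", ".js": "JavaScript", ".ts": "TypeScript", ".tsx": "TypeScript",
--     ".go": "Go", ".rs": "Rust", ".rb": "Ruby", ".java": "Java", ".kt": "Kotlin",
--     ".sh": "Shell", ".bash": "Shell", ".zsh": "Shell",
--     ".yml": "YAML", ".yaml": "YAML", ".toml": "TOML", ".json": "JSON",
--     ".md": "Markdown", ".tf": "Terraform", ".hcl": "HCL",
--     ".dockerfile": "Dockerfile", ".sql": "SQL", ".css": "CSS", ".html": "HTML",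
-- }
--
-- def preprocess_diff(raw_diff: str, max_tokens: int = 30000) -> str:
--     """Preprocess a unified diff for better LLM consumption.
--
--     1. Strip delete-only files (files with no additions — reviews focus on new code)
--     2. Annotate files with language
--     3. If over token budget, sort files by size and truncate
--
--     Returns processed diff string.
--     """
--     if not raw_diff.strip():
--         return raw_diff
--
--     # Split diff into per-file chunks
--     files: list[tuple[str, str]] = []  # (filename, diff_text)
--     current_file = ""
--     current_lines: list[str] = []
--
--     for line in raw_diff.splitlines(keepends=True):
--         if line.startswith("diff --git "):
--             if current_file and current_lines:
--                 files.append((current_file, "".join(current_lines)))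
--             current_lines = [line]
--             # Extract filename from "diff --git a/path b/path"
--             parts = line.strip().split(" b/", 1)
--             current_file = parts[1] if len(parts) > 1 else ""
--         else:
--             current_lines.append(line)
--
--     if current_file and current_lines:
--         files.append((current_file, "".join(current_lines)))
--
--     if not files:
--         return raw_diff
--
--     # Process each file: strip delete-only hunks, add language annotation
--     processed = []
--     for filename, diff_text in files:
--         # Check if this file's diff is delete-only (no added lines)
--         has_additions = any(
--             line.startswith("+") and not line.startswith("+++")
--             for line in diff_text.splitlines()
--         )
--         if not has_additions:
--             continue  # Skip delete-only files
--
--         # Add language annotation header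
--         ext = "." + filename.rsplit(".", 1)[-1] if "." in filename else ""
--         lang = _EXT_TO_LANG.get(ext.lower(), "")
--         if filename.lower().startswith("dockerfile"):
--             lang = "Dockerfile"
--         header = f"## {filename}" + (f" [{lang}]" if lang else "") + "\n"
--
--         processed.append((filename, header + diff_text))
--
--     # Token budget check (rough: 1 token ≈ 4 chars)
--     total_chars = sum(len(d) for _, d in processed)
--     token_estimate = total_chars // 4
--
--     if token_estimate > max_tokens:
--         # Sort: smallest files first (most likely to be meaningful changes)
--         processed.sort(key=lambda x: len(x[1]))
--         kept = []
--         budget = max_tokens * 4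
--         used = 0
--         skipped = []
--         for filename, diff_text in processed:
--             if used + len(diff_text) > budget:
--                 skipped.append(filename)
--             else:
--                 kept.append(diff_text)
--                 used += len(diff_text)
--         result = "\n".join(kept)
--         if skipped:
--             result += f"\n\n(Skipped {len(skipped)} large files due to token budget: {', '.join(skipped)})\n"
--         return result
--
--     return "\n".join(d for _, d in processed)
-- ===== SOURCE B (Python) =====
-- _EXT_TO_LANG = {
--     ".py": "Python", ".js": "JavaScript", ".ts": "TypeScript", ".tsx": "TypeScript",
--     ".go": "Go", ".rs": "Rust", ".rb": "Ruby", ".java": "Java", ".kt": "Kotlin",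
--     ".sh": "Shell", ".bash": "Shell", ".zsh": "Shell",
--     ".yml": "YAML", ".yaml": "YAML", ".toml": "TOML", ".json": "JSON",
--     ".md": "Markdown", ".tf": "Terraform", ".hcl": "HCL",
--     ".dockerfile": "Dockerfile", ".sql": "SQL", ".css": "CSS", ".html": "HTML",
-- }
--
-- _HDR = "diff --git "
--
--
-- def _next_hdr(lines, i):
--     """Index of the first 'diff --git ' line at position >= i (len(lines) if none)."""
--     while i < len(lines) and not lines[i].startswith(_HDR):
--         i += 1
--     return i
--
--
-- def _lang_of(filename):
--     if filename.lower().startswith("dockerfile"):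
--         return "Dockerfile"
--     dot = filename.rfind(".")
--     ext = "" if dot < 0 else "." + filename[dot + 1:]
--     return _EXT_TO_LANG.get(ext.lower(), "")
--
--
-- def _annotate(filename, text):
--     lang = _lang_of(filename)
--     return "## " + filename + (" [" + lang + "]" if lang else "") + "\n" + text
--
--
-- def preprocess_diff(raw_diff: str, max_tokens: int = 30000) -> str:
--     if not raw_diff.strip():
--         return raw_diff
--
--     # Phase 1: slice the line list at each header position (content before the
--     # first header is not part of any file chunk and is dropped).
--     lines = raw_diff.splitlines(keepends=True)
--     files = []
--     i = _next_hdr(lines, 0)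
--     while i < len(lines):
--         j = _next_hdr(lines, i + 1)
--         parts = lines[i].strip().split(" b/", 1)
--         fname = parts[1] if len(parts) > 1 else ""
--         if fname:
--             files.append((fname, "".join(lines[i:j])))
--         i = j
--
--     if not files:
--         return raw_diff
--
--     # Phase 2: keep files with additions, prefix a language-annotated header.
--     processed = [(fname, _annotate(fname, text)) for fname, text in files
--                  if any(l.startswith("+") and not l.startswith("+++")
--                         for l in text.splitlines())]
--
--     # Phase 3: budget. Since chunks are scanned smallest-first, the kept set is
--     # exactly the longest prefix of the sorted list fitting the budget.
--     if sum(len(d) for _, d in processed) // 4 <= max_tokens: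
--         return "\n".join(d for _, d in processed)
--
--     ordered = sorted(processed, key=lambda x: len(x[1]))
--     budget = max_tokens * 4
--     cut, used = 0, 0
--     while cut < len(ordered) and used + len(ordered[cut][1]) <= budget:
--         used += len(ordered[cut][1])
--         cut += 1
--     result = "\n".join(d for _, d in ordered[:cut])
--     skipped = [f for f, _ in ordered[cut:]]
--     if skipped:
--         result += f"\n\n(Skipped {len(skipped)} large files due to token budget: {', '.join(skipped)})\n"
--     return result
-- ===== Notes on version B (the rewrite author's own statement) =====
-- stated objective: alternative
-- what changed: Phase 1 locates 'diff --git ' header positions and slices the line list between consecutive headers instead of A's stateful accumulate-until-next-header fold; phase 2 becomes a filterMap (comprehension) with the Dockerfile check hoisted before the extension lookup; phase 3 replaces A's skip-collecting fold by a single prefix cut of the size-sorted list (valid because lengths are nondecreasing).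
import Mathlib
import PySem

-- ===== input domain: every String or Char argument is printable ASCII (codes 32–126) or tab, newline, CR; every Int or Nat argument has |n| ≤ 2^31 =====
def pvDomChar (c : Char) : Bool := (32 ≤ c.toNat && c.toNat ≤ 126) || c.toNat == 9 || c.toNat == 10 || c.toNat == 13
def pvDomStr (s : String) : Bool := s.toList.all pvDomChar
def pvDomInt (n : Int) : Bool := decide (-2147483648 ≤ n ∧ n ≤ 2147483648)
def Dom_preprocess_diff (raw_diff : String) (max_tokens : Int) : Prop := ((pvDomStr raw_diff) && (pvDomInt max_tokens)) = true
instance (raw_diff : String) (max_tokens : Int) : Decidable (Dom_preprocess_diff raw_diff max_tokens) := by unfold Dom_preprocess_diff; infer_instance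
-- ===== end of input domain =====

-- B replaces A's stateful accumulate-until-next-header loop by slicing the line list at
-- header positions, the append-loop of phase 2 by a filterMap, and phase 3's skip-collecting
-- fold by a single prefix cut of the sorted list (objective: alternative decomposition).

-- ===== PORT A =====

-- module-level _EXT_TO_LANG dict (shared context of both implementations)
def pvExtToLang : PySem.Dict String String := PySem.Dict.ofList
  [(".py", "Python"), (".js", "JavaScript"), (".ts", "TypeScript"), (".tsx", "TypeScript"),
   (".go", "Go"), (".rs", "Rust"), (".rb", "Ruby"), (".java", "Java"), (".kt", "Kotlin"),
   (".sh", "Shell"), (".bash", "Shell"), (".zsh", "Shell"),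
   (".yml", "YAML"), (".yaml", "YAML"), (".toml", "TOML"), (".json", "JSON"),
   (".md", "Markdown"), (".tf", "Terraform"), (".hcl", "HCL"),
   (".dockerfile", "Dockerfile"), (".sql", "SQL"), (".css", "CSS"), (".html", "HTML")]

-- hand port of str.splitlines(keepends=True): exact on strings whose characters are
-- printable ASCII / tab / '\n' / '\r' (the Dom), where the line breaks are \n, \r, \r\n
def pvSplitKeepAux : List Char → List Char → List String
  | acc, [] => if acc = [] then [] else [String.ofList acc.reverse]
  | acc, '\r' :: '\n' :: rest => String.ofList (acc.reverse ++ ['\r', '\n']) :: pvSplitKeepAux [] rest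
  | acc, '\r' :: rest => String.ofList (acc.reverse ++ ['\r']) :: pvSplitKeepAux [] rest
  | acc, '\n' :: rest => String.ofList (acc.reverse ++ ['\n']) :: pvSplitKeepAux [] rest
  | acc, c :: rest => pvSplitKeepAux (c :: acc) rest

def pvSplitlinesKeep (s : String) : List String := pvSplitKeepAux [] s.toList

-- line.startswith("diff --git ")
def pvIsHdr (l : String) : Bool := PySem.Str.startswith l "diff --git "

-- parts = line.strip().split(" b/", 1); parts[1] if len(parts) > 1 else ""
def pvFnameOf (l : String) : String :=
  let parts := (PySem.Str.splitMax? (PySem.Str.strip l) " b/" 1).getD []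
  if parts.length > 1 then parts.getD 1 "" else ""

-- any(line.startswith("+") and not line.startswith("+++") for line in diff_text.splitlines())
def pvHasAdd (d : String) : Bool :=
  (PySem.Str.splitlines d).any (fun l => PySem.Str.startswith l "+" && !(PySem.Str.startswith l "+++"))

-- filename.rsplit(".", 1)[-1] = suffix of filename after the last '.'; exact under '"." in filename'
def pvAfterLastDot (fname : String) : String :=
  String.ofList ((fname.toList.reverse.takeWhile (· ≠ '.')).reverse)

-- A's language computation: dict lookup first, Dockerfile override after
def pvLangA (fname : String) : String :=
  let ext := if PySem.Str.isIn "." fname then String.ofList ('.' :: (pvAfterLastDot fname).toList) else ""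
  let lang := pvExtToLang.getD (PySem.Str.lower ext) ""
  if PySem.Str.startswith (PySem.Str.lower fname) "dockerfile" then "Dockerfile" else lang

-- header = f"## {filename}" + (f" [{lang}]" if lang else "") + "\n"
def pvHeader (fname lang : String) : String :=
  "## " ++ fname ++ (if lang ≠ "" then " [" ++ lang ++ "]" else "") ++ "\n"

def preprocess_diff (raw_diff : String) (max_tokens : Int) : String :=
  if PySem.Str.strip raw_diff = "" then raw_diff else
  -- accumulate (current_file, current_lines, files) over the lines
  let st := (pvSplitlinesKeep raw_diff).foldl
    (fun (st : String × List String × List (String × String)) line =>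
      if pvIsHdr line then
        let files := if st.1 ≠ "" ∧ st.2.1 ≠ [] then st.2.2 ++ [(st.1, PySem.Str.join "" st.2.1)] else st.2.2
        (pvFnameOf line, [line], files)
      else (st.1, st.2.1 ++ [line], st.2.2)) ("", [], [])
  let files := if st.1 ≠ "" ∧ st.2.1 ≠ [] then st.2.2 ++ [(st.1, PySem.Str.join "" st.2.1)] else st.2.2
  if files = [] then raw_diff else
  let processed := files.foldl
    (fun acc fd => if pvHasAdd fd.2 then acc ++ [(fd.1, pvHeader fd.1 (pvLangA fd.1) ++ fd.2)] else acc) []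
  let totalChars := processed.foldl (fun acc fd => acc + (PySem.Str.len fd.2 : Int)) 0
  if PySem.Int.floordiv totalChars 4 > max_tokens then
    let ordered := PySem.List.sorted processed (fun x => PySem.Str.len x.2)
    let fin := ordered.foldl
      (fun (st : List String × Int × List String) fd =>
        if st.2.1 + (PySem.Str.len fd.2 : Int) > max_tokens * 4 then (st.1, st.2.1, st.2.2 ++ [fd.1])
        else (st.1 ++ [fd.2], st.2.1 + (PySem.Str.len fd.2 : Int), st.2.2)) ([], 0, [])
    let result := PySem.Str.join "\n" fin.1
    if fin.2.2 ≠ [] then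
      result ++ "\n\n(Skipped " ++ PySem.Int.toStr (fin.2.2.length : Int) ++
        " large files due to token budget: " ++ PySem.Str.join ", " fin.2.2 ++ ")\n"
    else result
  else PySem.Str.join "\n" (processed.map (·.2))

-- ===== PORT B =====

-- _next_hdr(lines, i): first index ≥ i whose line starts the next file
def pvNextHdr (lines : List String) (i : Nat) : Nat :=
  if h : i < lines.length then
    if pvIsHdr lines[i] then i else pvNextHdr lines (i + 1)
  else i
termination_by lines.length - i

theorem pvNextHdr_ge (lines : List String) (i : Nat) : i ≤ pvNextHdr lines i := by
  unfold pvNextHdr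
  split
  · split
    · exact le_refl i
    · exact le_trans (Nat.le_succ i) (pvNextHdr_ge lines (i + 1))
  · exact le_refl i
termination_by lines.length - i

-- B's main loop: slice lines[i:j] between consecutive header positions
def pvChunksB (lines : List String) (i : Nat) : List (String × String) :=
  if h : i < lines.length then
    let j := pvNextHdr lines (i + 1)
    let fname := pvFnameOf lines[i]
    (if fname ≠ "" then [(fname, PySem.Str.join "" (PySem.List.slice lines (some (i : Int)) (some (j : Int))))] else []) ++
      pvChunksB lines j
  else []
termination_by lines.length - i
decreasing_by
  have := pvNextHdr_ge lines (i + 1)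
  omega

-- B's language computation: Dockerfile check first, else extension lookup
def pvLangB (fname : String) : String :=
  if PySem.Str.startswith (PySem.Str.lower fname) "dockerfile" then "Dockerfile"
  else
    let ext := if fname.toList.contains '.' then String.ofList ('.' :: (pvAfterLastDot fname).toList) else ""
    pvExtToLang.getD (PySem.Str.lower ext) ""

def pvAnnotate (fname text : String) : String := pvHeader fname (pvLangB fname) ++ text

-- while cut < len(ordered) and used + len(ordered[cut][1]) <= budget: …
def pvCutB : List (String × String) → Int → Int → Nat
  | [], _, _ => 0
  | fd :: rest, used, budget =>
    if used + (PySem.Str.len fd.2 : Int) ≤ budget then pvCutB rest (used + (PySem.Str.len fd.2 : Int)) budget + 1 else 0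

def preprocess_diff_alt (raw_diff : String) (max_tokens : Int) : String :=
  if PySem.Str.strip raw_diff = "" then raw_diff else
  let lines := pvSplitlinesKeep raw_diff
  let files := pvChunksB lines (pvNextHdr lines 0)
  if files = [] then raw_diff else
  let processed := files.filterMap (fun fd => if pvHasAdd fd.2 then some (fd.1, pvAnnotate fd.1 fd.2) else none)
  if PySem.Int.floordiv (processed.foldl (fun acc fd => acc + (PySem.Str.len fd.2 : Int)) 0) 4 ≤ max_tokens then
    PySem.Str.join "\n" (processed.map (·.2))
  else
    let ordered := PySem.List.sorted processed (fun x => PySem.Str.len x.2)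
    let cut := pvCutB ordered 0 (max_tokens * 4)
    let result := PySem.Str.join "\n" ((PySem.List.slice ordered none (some (cut : Int))).map (·.2))
    let skipped := (PySem.List.slice ordered (some (cut : Int)) none).map (·.1)
    if skipped ≠ [] then
      result ++ "\n\n(Skipped " ++ PySem.Int.toStr (skipped.length : Int) ++
        " large files due to token budget: " ++ PySem.Str.join ", " skipped ++ ")\n"
    else result

-- ===== PRECONDITION & SPEC =====
def Spec_preprocess_diff (raw_diff : String) (max_tokens : Int) (out : String) : Prop := out = preprocess_diff_alt raw_diff max_tokens
instance (raw_diff : String) (max_tokens : Int) (out : String) : Decidable (Spec_preprocess_diff raw_diff max_tokens out) := by unfold Spec_preprocess_diff; infer_instance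

-- ===== CLAIM (what is proved, stated in full; the proofs are below) =====
def Claim_equal_preprocess_diff : Prop := ∀ (raw_diff : String) (max_tokens : Int), Dom_preprocess_diff raw_diff max_tokens → Spec_preprocess_diff raw_diff max_tokens (preprocess_diff raw_diff max_tokens)

-- ===== LEMMAS AND PROOFS =====

-- common spec of phase 1: emit a (filename, chunk) pair at each header / at the end
def pvEmit : String → List String → List String → List (String × String)
  | cf, cls, [] => if cf ≠ "" ∧ cls ≠ [] then [(cf, PySem.Str.join "" cls)] else []
  | cf, cls, l :: ls =>
    if pvIsHdr l then
      (if cf ≠ "" ∧ cls ≠ [] then [(cf, PySem.Str.join "" cls)] else []) ++ pvEmit (pvFnameOf l) [l] ls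
    else pvEmit cf (cls ++ [l]) ls

theorem phase1A_eq_emit (ls : List String) : ∀ cf cls files,
    (fun (st : String × List String × List (String × String)) =>
        if st.1 ≠ "" ∧ st.2.1 ≠ [] then st.2.2 ++ [(st.1, PySem.Str.join "" st.2.1)] else st.2.2)
      (ls.foldl
        (fun (st : String × List String × List (String × String)) line =>
          if pvIsHdr line then
            let files := if st.1 ≠ "" ∧ st.2.1 ≠ [] then st.2.2 ++ [(st.1, PySem.Str.join "" st.2.1)] else st.2.2
            (pvFnameOf line, [line], files)
          else (st.1, st.2.1 ++ [line], st.2.2)) (cf, cls, files)) =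
    files ++ pvEmit cf cls ls := by
  induction ls with
  | nil =>
    intro cf cls files
    simp only [List.foldl, pvEmit]
    split <;> simp
  | cons l ls ih =>
    intro cf cls files
    simp only [List.foldl, pvEmit]
    by_cases h : pvIsHdr l = true
    · simp only [h, if_true, ih]
      split <;> simp
    · simp only [eq_false_of_ne_true (by simpa using h), if_false, Bool.false_eq_true, ih]

theorem pvNextHdr_le (lines : List String) (i : Nat) (h : i ≤ lines.length) :
    pvNextHdr lines i ≤ lines.length := by
  unfold pvNextHdr
  split
  · split
    · omega
    · exact pvNextHdr_le lines (i + 1) (by omega)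
  · omega
termination_by lines.length - i

theorem pvNextHdr_nonhdr (lines : List String) (i k : Nat) (hk : k < lines.length)
    (h1 : i ≤ k) (h2 : k < pvNextHdr lines i) : pvIsHdr lines[k] = false := by
  rw [pvNextHdr.eq_def] at h2
  by_cases hi : i < lines.length
  · simp only [hi, dif_pos] at h2
    by_cases hh : pvIsHdr lines[i] = true
    · rw [if_pos hh] at h2; omega
    · rw [if_neg hh] at h2
      by_cases hik : i = k
      · subst hik; simpa using hh
      · exact pvNextHdr_nonhdr lines (i + 1) k hk (by omega) h2
  · simp only [hi, dif_neg, not_false_iff] at h2; omega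
termination_by lines.length - i
decreasing_by omega

theorem pvNextHdr_hdr (lines : List String) (i : Nat)
    (h : pvNextHdr lines i < lines.length) : pvIsHdr (lines.getD (pvNextHdr lines i) "") = true := by
  rw [pvNextHdr.eq_def] at h ⊢
  by_cases hi : i < lines.length
  · simp only [hi, dif_pos] at h ⊢
    by_cases hh : pvIsHdr lines[i] = true
    · rw [if_pos hh, List.getD_eq_getElem lines "" hi]; exact hh
    · rw [if_neg hh] at h ⊢
      exact pvNextHdr_hdr lines (i + 1) h
  · simp only [hi, dif_neg, not_false_iff] at h
termination_by lines.length - i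
decreasing_by omega

theorem pvEmit_nonhdr (ns : List String) : ∀ cf cls ls, (∀ x ∈ ns, pvIsHdr x = false) →
    pvEmit cf cls (ns ++ ls) = pvEmit cf (cls ++ ns) ls := by
  induction ns with
  | nil => intro cf cls ls _; simp
  | cons n ns ih =>
    intro cf cls ls h
    have hn : pvIsHdr n = false := h n (by simp)
    simp only [List.cons_append, pvEmit, hn, Bool.false_eq_true, if_false]
    rw [ih cf (cls ++ [n]) ls (fun x hx => h x (by simp [hx]))]
    simp

theorem pvEmit_eq_chunksB (lines : List String) (i : Nat) (cf : String) (cls : List String)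
    (hle : i ≤ lines.length)
    (hcase : i = lines.length ∨ (i < lines.length ∧ pvIsHdr (lines.getD i "") = true)) :
    pvEmit cf cls (lines.drop i) =
      (if cf ≠ "" ∧ cls ≠ [] then [(cf, PySem.Str.join "" cls)] else []) ++ pvChunksB lines i := by
  rcases hcase with heq | ⟨hi, hhdr⟩
  · subst heq
    rw [List.drop_of_length_le (le_refl _), pvChunksB.eq_def]
    simp [pvEmit]
  · have hdropi : lines.drop i = lines[i] :: lines.drop (i + 1) := List.drop_eq_getElem_cons hi
    have hhdr' : pvIsHdr lines[i] = true := by rwa [List.getD_eq_getElem lines "" hi] at hhdr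
    have hij : i + 1 ≤ pvNextHdr lines (i + 1) := pvNextHdr_ge lines (i + 1)
    have hjle : pvNextHdr lines (i + 1) ≤ lines.length := pvNextHdr_le lines (i + 1) (by omega)
    set j := pvNextHdr lines (i + 1) with hj
    have hdrop1 : lines.drop (i + 1) =
        (lines.drop (i + 1)).take (j - (i + 1)) ++ lines.drop j := by
      conv_lhs => rw [← List.take_append_drop (j - (i + 1)) (lines.drop (i + 1))]
      rw [List.drop_drop]
      congr 2
      omega
    have hns : ∀ x ∈ (lines.drop (i + 1)).take (j - (i + 1)), pvIsHdr x = false := by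
      intro x hx
      obtain ⟨k, hk, hxk⟩ := List.mem_iff_getElem.mp hx
      have hk1 : k < j - (i + 1) := by
        have := hk
        simp [List.length_take] at this
        omega
      have hk2 : i + 1 + k < lines.length := by omega
      have : x = lines[i + 1 + k] := by
        rw [← hxk]
        rw [List.getElem_take, List.getElem_drop]
      rw [this]
      exact pvNextHdr_nonhdr lines (i + 1) (i + 1 + k) hk2 (by omega) (by omega)
    have hcase' : j = lines.length ∨ (j < lines.length ∧ pvIsHdr (lines.getD j "") = true) := by
      by_cases hjl : j < lines.length
      · exact Or.inr ⟨hjl, pvNextHdr_hdr lines (i + 1) (by omega)⟩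
      · exact Or.inl (by omega)
    rw [hdropi]
    simp only [pvEmit, hhdr', if_true]
    rw [hdrop1, pvEmit_nonhdr _ _ _ _ hns]
    rw [pvEmit_eq_chunksB lines j (pvFnameOf lines[i])
      ([lines[i]] ++ (lines.drop (i + 1)).take (j - (i + 1))) hjle hcase']
    conv_rhs => rw [pvChunksB.eq_def]
    simp only [hi, dif_pos, ← hj]
    have hslice : PySem.List.slice lines (some (i : Int)) (some (j : Int)) =
        lines[i] :: (lines.drop (i + 1)).take (j - (i + 1)) := by
      rw [PySem.List.slice_natCast]
      rw [hdropi]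
      have : j - i = (j - (i + 1)) + 1 := by omega
      rw [this, List.take_succ_cons]
    rw [hslice]
    simp
termination_by lines.length - i
decreasing_by omega

theorem phase1_eq (lines : List String) :
    pvEmit "" [] lines = pvChunksB lines (pvNextHdr lines 0) := by
  have hj0le : pvNextHdr lines 0 ≤ lines.length := pvNextHdr_le lines 0 (by omega)
  have hns : ∀ x ∈ lines.take (pvNextHdr lines 0), pvIsHdr x = false := by
    intro x hx
    obtain ⟨k, hk, hxk⟩ := List.mem_iff_getElem.mp hx
    have hk1 : k < pvNextHdr lines 0 := by
      have := hk
      simp [List.length_take] at this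
      omega
    have hk2 : k < lines.length := by
      have := hk
      simp [List.length_take] at this
      omega
    have : x = lines[k] := by rw [← hxk, List.getElem_take]
    rw [this]
    exact pvNextHdr_nonhdr lines 0 k hk2 (by omega) hk1
  have hcase' : pvNextHdr lines 0 = lines.length ∨
      (pvNextHdr lines 0 < lines.length ∧ pvIsHdr (lines.getD (pvNextHdr lines 0) "") = true) := by
    by_cases hjl : pvNextHdr lines 0 < lines.length
    · exact Or.inr ⟨hjl, pvNextHdr_hdr lines 0 hjl⟩
    · exact Or.inl (by omega)
  conv_lhs => rw [show lines = lines.take (pvNextHdr lines 0) ++ lines.drop (pvNextHdr lines 0) from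
    (List.take_append_drop _ _).symm]
  rw [pvEmit_nonhdr _ _ _ _ hns]
  rw [pvEmit_eq_chunksB lines (pvNextHdr lines 0) "" ([] ++ lines.take (pvNextHdr lines 0)) hj0le hcase']
  simp

theorem lang_eq (fname : String) : pvLangA fname = pvLangB fname := by
  have h2 : ['.'] <:+: fname.toList ↔ '.' ∈ fname.toList := by
    constructor
    · intro h; exact List.singleton_sublist.mp h.sublist
    · intro h
      obtain ⟨s, t, hst⟩ := List.append_of_mem h
      rw [hst]
      exact ⟨s, t, by simp⟩
  have key : PySem.Str.isIn "." fname = fname.toList.contains '.' := by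
    by_cases hm : '.' ∈ fname.toList
    · have h3 := (PySem.Chars.find_ne_neg_one_iff fname.toList ['.']).mpr (h2.mpr hm)
      simp [PySem.Str.isIn, PySem.Chars.isIn, hm, bne_iff_ne, h3]
    · have h3 := (PySem.Chars.find_eq_neg_one_iff fname.toList ['.']).mpr (fun hc => hm (h2.mp hc))
      simp [PySem.Str.isIn, PySem.Chars.isIn, hm, h3]
  unfold pvLangA pvLangB
  rw [key]

theorem phase2_eq (files : List (String × String)) :
    files.foldl (fun acc fd => if pvHasAdd fd.2 then acc ++ [(fd.1, pvHeader fd.1 (pvLangA fd.1) ++ fd.2)] else acc) [] =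
    files.filterMap (fun fd => if pvHasAdd fd.2 then some (fd.1, pvAnnotate fd.1 fd.2) else none) := by
  rw [PySem.List.foldl_append_if]
  rw [List.nil_append]
  have hmap : files.filterMap (fun fd => if pvHasAdd fd.2 then some (fd.1, pvAnnotate fd.1 fd.2) else none) =
      (files.filter (fun fd => pvHasAdd fd.2)).map (fun fd => (fd.1, pvAnnotate fd.1 fd.2)) := by
    induction files with
    | nil => simp
    | cons a t ih => by_cases h : pvHasAdd a.2 = true <;> simp [h, ih]
  rw [hmap]
  exact List.map_congr_left (fun x _ => by simp [pvAnnotate, lang_eq])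

theorem skip_all (l : List (String × String)) (budget : Int) :
    ∀ kept used skipped, (∀ p ∈ l, budget < used + (PySem.Str.len p.2 : Int)) →
    l.foldl (fun (st : List String × Int × List String) fd =>
      if st.2.1 + (PySem.Str.len fd.2 : Int) > budget then (st.1, st.2.1, st.2.2 ++ [fd.1])
      else (st.1 ++ [fd.2], st.2.1 + (PySem.Str.len fd.2 : Int), st.2.2)) (kept, used, skipped) =
    (kept, used, skipped ++ l.map (·.1)) := by
  induction l with
  | nil => intro kept used skipped _; simp
  | cons p l ih =>
    intro kept used skipped h
    simp only [List.foldl]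
    rw [if_pos (h p (by simp))]
    rw [ih kept used (skipped ++ [p.1]) (fun q hq => h q (by simp [hq]))]
    simp

theorem cut_spec (budget : Int) : ∀ (l : List (String × String)),
    l.Pairwise (fun a b => PySem.Str.len a.2 ≤ PySem.Str.len b.2) →
    ∀ kept used,
    l.foldl (fun (st : List String × Int × List String) fd =>
      if st.2.1 + (PySem.Str.len fd.2 : Int) > budget then (st.1, st.2.1, st.2.2 ++ [fd.1])
      else (st.1 ++ [fd.2], st.2.1 + (PySem.Str.len fd.2 : Int), st.2.2)) (kept, used, []) =
    (kept ++ (l.take (pvCutB l used budget)).map (·.2),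
     used + (((l.take (pvCutB l used budget)).map (fun p => (PySem.Str.len p.2 : Int))).sum),
     (l.drop (pvCutB l used budget)).map (·.1)) := by
  intro l
  induction l with
  | nil => intro _ kept used; simp [pvCutB]
  | cons fd rest ih =>
    intro hp kept used
    have hall : ∀ b ∈ rest, PySem.Str.len fd.2 ≤ PySem.Str.len b.2 := fun b hb => (List.pairwise_cons.mp hp).1 b hb
    have hp' : rest.Pairwise (fun a b => PySem.Str.len a.2 ≤ PySem.Str.len b.2) := (List.pairwise_cons.mp hp).2
    by_cases h : used + (PySem.Str.len fd.2 : Int) ≤ budget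
    · simp only [List.foldl, pvCutB, if_pos h]
      rw [if_neg (by omega)]
      rw [ih hp' (kept ++ [fd.2]) (used + (PySem.Str.len fd.2 : Int))]
      simp only [List.take_succ_cons, List.drop_succ_cons, List.map_cons,
        Prod.mk.injEq, List.sum_cons]
      refine ⟨by simp, by ring, trivial⟩
    · simp only [List.foldl, pvCutB, if_neg h]
      rw [if_pos (by omega)]
      simp only [List.nil_append]
      rw [skip_all rest budget kept used [fd.1]
        (fun q hq => by have := hall q hq; omega)]
      simp

-- ===== VERDICT (by name: the statement is the Claim_ definition above) =====
theorem preprocess_diff_spec : Claim_equal_preprocess_diff := by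
  intro raw_diff max_tokens _
  unfold Spec_preprocess_diff preprocess_diff preprocess_diff_alt
  by_cases hstrip : PySem.Str.strip raw_diff = ""
  · rw [if_pos hstrip, if_pos hstrip]
  rw [if_neg hstrip, if_neg hstrip]
  have h1 := phase1A_eq_emit (pvSplitlinesKeep raw_diff) "" [] []
  simp only [List.nil_append] at h1
  rw [phase1_eq] at h1
  simp only []
  rw [h1]
  set files := pvChunksB (pvSplitlinesKeep raw_diff) (pvNextHdr (pvSplitlinesKeep raw_diff) 0) with hf
  by_cases hfe : files = []
  · rw [if_pos hfe, if_pos hfe]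
  rw [if_neg hfe, if_neg hfe]
  rw [phase2_eq]
  set processed := files.filterMap (fun fd => if pvHasAdd fd.2 then some (fd.1, pvAnnotate fd.1 fd.2) else none) with hpr
  set tot := processed.foldl (fun acc fd => acc + (PySem.Str.len fd.2 : Int)) 0 with htot
  by_cases hcond : PySem.Int.floordiv tot 4 ≤ max_tokens
  · rw [if_neg (by omega), if_pos hcond]
  rw [if_pos (by omega), if_neg hcond]
  set ordered := PySem.List.sorted processed (fun x => PySem.Str.len x.2) with hor
  have hpair : ordered.Pairwise (fun a b => PySem.Str.len a.2 ≤ PySem.Str.len b.2) :=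
    PySem.List.sorted_pairwise processed (fun x => PySem.Str.len x.2)
  rw [cut_spec (max_tokens * 4) ordered hpair [] 0]
  rw [PySem.List.slice_to_natCast, PySem.List.slice_from_natCast]
  simp only [List.nil_append]
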